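-- pv_equiv track=rewrite | github.com/Ohevotach/MY-MCHN-LPR-FULL-PROJECT | utils/metric_visuals.py | _ordered_method_items
-- ===== SOURCE A (Python) =====
-- def _ordered_method_items(model_results):
--     priority = [
--         "Modern Hopfield",
--         "Affine-robust Hopfield",
--         "Balanced Traditional Hopfield",
--         "CNN",
--         "Nearest Neighbor",
--         "Euclidean NN",
--         "Class Prototype",
--     ]
--     items = list(model_results.items())
--     order = {name: idx for idx, name in enumerate(priority)}
--     return sorted(items, key=lambda item: order.get(item[0], len(order) + items.index(item)))
-- ===== SOURCE B (Python) =====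
-- def _ordered_method_items(model_results):
--     priority = [
--         "Modern Hopfield",
--         "Affine-robust Hopfield",
--         "Balanced Traditional Hopfield",
--         "CNN",
--         "Nearest Neighbor",
--         "Euclidean NN",
--         "Class Prototype",
--     ]
--     pset = set(priority)
--     out = []
--     for name in priority:
--         if name in model_results:
--             out.append((name, model_results[name]))
--     for name, val in model_results.items():
--         if name not in pset:
--             out.append((name, val))
--     return out
-- ===== Notes on version B (the rewrite author's own statement) =====
-- stated objective: faster
-- what changed: Replaces the sort (whose key performs a quadratic items.index scan) by two appending passes: priority names present in priority order first, then the remaining items in insertion order.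
import Mathlib
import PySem

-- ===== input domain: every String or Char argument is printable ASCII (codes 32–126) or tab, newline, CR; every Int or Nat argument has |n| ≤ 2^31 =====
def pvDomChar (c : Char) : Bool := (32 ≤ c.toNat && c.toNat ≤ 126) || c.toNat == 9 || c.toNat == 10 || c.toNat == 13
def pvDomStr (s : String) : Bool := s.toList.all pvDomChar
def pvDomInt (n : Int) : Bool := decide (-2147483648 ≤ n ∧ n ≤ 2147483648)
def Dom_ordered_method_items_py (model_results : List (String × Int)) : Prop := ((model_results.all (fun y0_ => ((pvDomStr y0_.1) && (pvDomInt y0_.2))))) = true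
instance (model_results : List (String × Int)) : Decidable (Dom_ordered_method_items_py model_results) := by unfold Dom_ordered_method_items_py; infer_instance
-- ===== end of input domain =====

-- B replaces A's stable sort (whose key does an items.index scan) by two appending passes:
-- priority names present in priority order, then the remaining items in insertion order; objective: faster (measured).

-- ===== PORT A =====
def ordered_method_items_py (model_results : List (String × Int)) : List (String × Int) :=
  let priority : List String :=
    ["Modern Hopfield", "Affine-robust Hopfield", "Balanced Traditional Hopfield",
     "CNN", "Nearest Neighbor", "Euclidean NN", "Class Prototype"]
  -- list(model_results.items()) of the dict parameter is the association list itself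
  let items : List (String × Int) := model_results
  -- order = {name: idx for idx, name in enumerate(priority)}
  let order : PySem.Dict String Int :=
    (PySem.List.enumerate priority 0).foldl (fun d p => d.insert p.2 p.1) PySem.Dict.empty
  -- items.index(item) never raises here since item ∈ items; .getD 0 is unreachable
  PySem.List.sorted items
    (fun item => order.getD item.1
      ((order.size : Int) + (((PySem.List.index? items item).getD 0 : Nat) : Int))) false

-- ===== PORT B =====
def ordered_method_items_py_alt (model_results : List (String × Int)) : List (String × Int) :=
  let priority : List String :=
    ["Modern Hopfield", "Affine-robust Hopfield", "Balanced Traditional Hopfield",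
     "CNN", "Nearest Neighbor", "Euclidean NN", "Class Prototype"]
  let pset : PySem.Set String := PySem.Set.ofList priority
  -- first pass: 'if name in model_results: out.append((name, model_results[name]))'
  let out : List (String × Int) :=
    priority.foldl (fun acc name =>
      match (PySem.Dict.mk model_results).get? name with
      | some v => acc ++ [(name, v)]
      | none => acc) []
  -- second pass over model_results.items(): 'if name not in pset: out.append((name, val))'
  model_results.foldl (fun acc p => if pset.contains p.1 then acc else acc ++ [p]) out

-- ===== PRECONDITION & SPEC =====
-- Pre_ excludes association lists with duplicate keys: they do not represent a Python dict
-- (A's parameter is a dict, whose keys are necessarily distinct), so A is never called on them.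
def Pre_ordered_method_items_py (model_results : List (String × Int)) : Prop :=
  (model_results.map Prod.fst).Nodup
instance (model_results : List (String × Int)) : Decidable (Pre_ordered_method_items_py model_results) := by unfold Pre_ordered_method_items_py; infer_instance

def pvWitness_ordered_method_items_py : (List (String × Int)) := [("CNN", 3), ("Zebra", -2)]

def Spec_ordered_method_items_py (model_results : List (String × Int)) (out : List (String × Int)) : Prop := out = ordered_method_items_py_alt model_results
instance (model_results : List (String × Int)) (out : List (String × Int)) : Decidable (Spec_ordered_method_items_py model_results out) := by unfold Spec_ordered_method_items_py; infer_instance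

-- ===== CLAIM (what is proved, stated in full; the proofs are below) =====
def Claim_equal_ordered_method_items_py : Prop := ∀ (model_results : List (String × Int)), Dom_ordered_method_items_py model_results → Pre_ordered_method_items_py model_results → Spec_ordered_method_items_py model_results (ordered_method_items_py model_results)

-- ===== LEMMAS AND PROOFS =====

-- proof-side names for the constants shared (definitionally) by both ports
def pvP : List String :=
  ["Modern Hopfield", "Affine-robust Hopfield", "Balanced Traditional Hopfield",
   "CNN", "Nearest Neighbor", "Euclidean NN", "Class Prototype"]
def pvOrd : PySem.Dict String Int :=
  (PySem.List.enumerate pvP 0).foldl (fun d p => d.insert p.2 p.1) PySem.Dict.empty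
def pvKey (mr : List (String × Int)) (item : String × Int) : Int :=
  pvOrd.getD item.1 ((pvOrd.size : Int) + (((PySem.List.index? mr item).getD 0 : Nat) : Int))
def pvF (mr : List (String × Int)) (name : String) : Option (String × Int) :=
  ((PySem.Dict.mk mr).get? name).map (fun v => (name, v))
def pvHead (mr : List (String × Int)) : List (String × Int) := pvP.filterMap (pvF mr)
def pvMemP (q : String × Int) : Bool := PySem.Set.contains (PySem.Set.ofList pvP) q.1

theorem pvA_eq (mr : List (String × Int)) :
    ordered_method_items_py mr = PySem.List.sorted mr (pvKey mr) false := rfl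

theorem pvB_eq (mr : List (String × Int)) :
    ordered_method_items_py_alt mr = pvHead mr ++ mr.filter (fun q => !pvMemP q) := by
  show (mr.foldl (fun acc p => if pvMemP p then acc else acc ++ [p])
      (pvP.foldl (fun acc name =>
        match (PySem.Dict.mk mr).get? name with
        | some v => acc ++ [(name, v)]
        | none => acc) [])) = _
  have h1 : (pvP.foldl (fun acc name =>
      match (PySem.Dict.mk mr).get? name with
      | some v => acc ++ [(name, v)]
      | none => acc) []) = pvHead mr := by
    have := PySem.List.foldl_congr_mem
      (l := pvP) (init := ([] : List (String × Int)))
      (f := fun acc name =>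
        match (PySem.Dict.mk mr).get? name with
        | some v => acc ++ [(name, v)]
        | none => acc)
      (g := fun acc name => acc ++ ((pvF mr name).toList))
      (by intro acc n _; unfold pvF; rcases hg : (PySem.Dict.mk mr).get? n with _ | v <;> simp [hg])
    rw [this, PySem.List.foldl_append_eq_flatMap]
    simpa [pvHead] using (List.filterMap_eq_flatMap_toList (pvF mr) pvP).symm
  have h2 : (fun (acc : List (String × Int)) p => if pvMemP p then acc else acc ++ [p])
      = fun acc p => if !pvMemP p then acc ++ [p] else acc := by
    funext acc p; cases h : pvMemP p <;> simp
  rw [h1, h2, PySem.List.foldl_append_if_eq_filter]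

theorem pvMemP_iff (q : String × Int) : pvMemP q = true ↔ q.1 ∈ pvP := by
  simp [pvMemP, pysem]

theorem pvGet?_mr (mr : List (String × Int)) (hnd : (mr.map Prod.fst).Nodup)
    (k : String) (v : Int) : (PySem.Dict.mk mr).get? k = some v ↔ (k, v) ∈ mr :=
  PySem.Dict.get?_eq_some_iff_mem_items (PySem.Dict.mk mr) k v (by simpa [PySem.Dict.keys] using hnd)

theorem pvKey_of_some (mr : List (String × Int)) (n : String) (v r : Int)
    (h : pvOrd.get? n = some r) : pvKey mr (n, v) = r := by
  unfold pvKey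
  exact PySem.Dict.getD_of_get?_eq_some pvOrd _ h

theorem pvIdxOf?_mem {α : Type} [BEq α] [LawfulBEq α] (l : List α) (a : α) (h : a ∈ l) :
    List.idxOf? a l = some (List.idxOf a l) := by
  induction l with
  | nil => simp at h
  | cons x t ih =>
    by_cases hx : a = x
    · simp [hx, List.idxOf?_cons]
    · rcases List.mem_cons.mp h with e | ht
      · exact absurd e hx
      · simp [List.idxOf?_cons, Ne.symm hx, ih ht]

theorem pvKey_of_none (mr : List (String × Int)) (q : String × Int)
    (hq : q.1 ∉ pvP) (hm : q ∈ mr) : pvKey mr q = 7 + (List.idxOf q mr : Int) := by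
  have hkeys : pvOrd.keys = pvP := by decide
  have hnone : pvOrd.get? q.1 = none := by
    rw [PySem.Dict.get?_eq_none_iff_not_mem_keys, hkeys]; exact hq
  have hsz : pvOrd.size = 7 := by decide
  have hidx : (PySem.List.index? mr q).getD 0 = List.idxOf q mr := by
    rw [PySem.List.index?_eq_idxOf?, pvIdxOf?_mem mr q hm]; rfl
  unfold pvKey
  rw [PySem.Dict.getD_of_get?_eq_none pvOrd _ hnone, hsz, hidx]
  push_cast
  ring

theorem pvIdxOf_pairwise {α : Type} [BEq α] [LawfulBEq α] (l : List α) (h : l.Nodup) :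
    l.Pairwise (fun a b => List.idxOf a l < List.idxOf b l) := by
  induction l with
  | nil => exact List.Pairwise.nil
  | cons x t ih =>
    rcases List.nodup_cons.mp h with ⟨hx, ht⟩
    refine List.pairwise_cons.mpr ⟨?_, ?_⟩
    · intro b hb
      have hbx : b ≠ x := fun e => hx (e ▸ hb)
      simp [Ne.symm hbx]
    · refine List.Pairwise.imp_of_mem ?_ (ih ht)
      intro a b ha hb hab
      have hax : a ≠ x := fun e => hx (e ▸ ha)
      have hbx : b ≠ x := fun e => hx (e ▸ hb)
      simp [Ne.symm hax, Ne.symm hbx]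
      omega

theorem main_lemma (mr : List (String × Int)) (hnd : (mr.map Prod.fst).Nodup) :
    ordered_method_items_py mr = ordered_method_items_py_alt mr := by
  have hmrnd : mr.Nodup := List.Nodup.of_map Prod.fst hnd
  rw [pvA_eq, pvB_eq]
  -- head members: x ∈ pvHead mr ↔ x ∈ mr ∧ x.1 ∈ pvP
  have hmemhead : ∀ x : String × Int, x ∈ pvHead mr ↔ x ∈ mr ∧ x.1 ∈ pvP := by
    intro x
    constructor
    · intro hx
      rcases List.mem_filterMap.mp hx with ⟨n, hn, hf⟩
      rcases Option.map_eq_some_iff.mp hf with ⟨v, hv, rfl⟩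
      exact ⟨(pvGet?_mr mr hnd n v).mp hv, hn⟩
    · rintro ⟨hm, hp⟩
      refine List.mem_filterMap.mpr ⟨x.1, hp, ?_⟩
      have := (pvGet?_mr mr hnd x.1 x.2).mpr (by simpa using hm)
      simp [pvF, this]
  -- the permutation: head ++ (non-priority items) is a rearrangement of mr
  have hheadnd : (pvHead mr).Nodup := by
    refine List.Nodup.filterMap ?_ (by decide)
    intro a b x hxa hxb
    have ha : x.1 = a := by
      rcases Option.map_eq_some_iff.mp hxa with ⟨v, _, rfl⟩; rfl
    have hb : x.1 = b := by
      rcases Option.map_eq_some_iff.mp hxb with ⟨v, _, rfl⟩; rfl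
    rw [← ha, ← hb]
  have hhp : (pvHead mr).Perm (mr.filter pvMemP) := by
    refine (List.perm_ext_iff_of_nodup hheadnd (hmrnd.filter _)).mpr ?_
    intro x
    rw [hmemhead, List.mem_filter, pvMemP_iff]
  have hperm : ((pvHead mr) ++ mr.filter (fun q => !pvMemP q)).Perm mr :=
    ((hhp.append (List.Perm.refl _))).trans (List.filter_append_perm pvMemP mr)
  -- strictly increasing keys along B's output
  have hQ : pvP.Pairwise (fun a b => (pvOrd.get? a).getD 99 < (pvOrd.get? b).getD 99 ∧
      (pvOrd.get? a).isSome ∧ (pvOrd.get? b).isSome) := by decide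
  have hbound : ∀ n ∈ pvP, (pvOrd.get? n).getD 99 ≤ 6 ∧ (pvOrd.get? n).isSome := by decide
  have hpw : ((pvHead mr) ++ mr.filter (fun q => !pvMemP q)).Pairwise
      (fun a b => pvKey mr a < pvKey mr b) := by
    rw [List.pairwise_append]
    refine ⟨?_, ?_, ?_⟩
    · unfold pvHead
      rw [List.pairwise_filterMap]
      refine hQ.imp ?_
      rintro a b ⟨hlt, ha, hb⟩ x hx y hy
      rcases Option.map_eq_some_iff.mp hx with ⟨va, hva, rfl⟩
      rcases Option.map_eq_some_iff.mp hy with ⟨vb, hvb, rfl⟩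
      obtain ⟨ra, hra⟩ := Option.isSome_iff_exists.mp ha
      obtain ⟨rb, hrb⟩ := Option.isSome_iff_exists.mp hb
      rw [pvKey_of_some mr a va ra hra, pvKey_of_some mr b vb rb hrb]
      simpa [hra, hrb] using hlt
    · refine List.Pairwise.imp_of_mem ?_
        (List.Pairwise.sublist List.filter_sublist (pvIdxOf_pairwise mr hmrnd))
      intro a b ha hb hab
      have ha' := List.mem_filter.mp ha
      have hb' := List.mem_filter.mp hb
      have hap : a.1 ∉ pvP := by
        intro h; have := (pvMemP_iff a).mpr h; simp [this] at ha'
      have hbp : b.1 ∉ pvP := by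
        intro h; have := (pvMemP_iff b).mpr h; simp [this] at hb'
      rw [pvKey_of_none mr a hap ha'.1, pvKey_of_none mr b hbp hb'.1]
      omega
    · intro x hx y hy
      rcases (hmemhead x).mp hx with ⟨_, hxp⟩
      obtain ⟨hle, hsome⟩ := hbound x.1 hxp
      obtain ⟨r, hr⟩ := Option.isSome_iff_exists.mp hsome
      have hkx : pvKey mr x = r := by
        obtain ⟨a, b⟩ := x
        exact pvKey_of_some mr a b r hr
      have hy' := List.mem_filter.mp hy
      have hyp : y.1 ∉ pvP := by
        intro h; have := (pvMemP_iff y).mpr h; simp [this] at hy'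
      rw [hkx, pvKey_of_none mr y hyp hy'.1]
      rw [hr] at hle
      simp only [Option.getD_some] at hle
      omega
  exact PySem.List.sorted_eq_of_perm_of_pairwise_lt _ _ _ hperm hpw

-- ===== VERDICT (by name: the statement is the Claim_ definition above) =====
theorem ordered_method_items_py_spec : Claim_equal_ordered_method_items_py := by
  intro mr _ hpre
  exact main_lemma mr hpre
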